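-- pv_equiv track=rewrite | github.com/Aayush2302/OCR_prediction | OCRImage/components/text_extraction.py | extract_digits_and_position
-- ===== SOURCE A (Python) =====
-- from typing import List, Tuple, Optional, Dict
--
-- def extract_digits_and_position(text: str) -> Tuple[str, int]:
--     """
--     Extract the longest sequence of digits and its position.
--
--     Args:
--         text: Input text
--
--     Returns:
--         Tuple of (digit_sequence, position)
--     """
--     digit_sequences = []
--     current_seq = ""
--     start_pos = -1
--
--     for i, char in enumerate(text):
--         if char.isdigit():
--             if not current_seq:
--                 start_pos = i
--             current_seq += char
--         else:
--             if current_seq: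
--                 digit_sequences.append((current_seq, start_pos))
--                 current_seq = ""
--
--     if current_seq:
--         digit_sequences.append((current_seq, start_pos))
--
--     if not digit_sequences:
--         return "", -1
--
--     # Return longest sequence
--     longest = max(digit_sequences, key=lambda x: len(x[0]))
--     return longest
-- ===== SOURCE B (Python) =====
-- import re
--
-- def extract_digits_and_position(text: str):
--     matches = list(re.finditer(r'\d+', text))
--     if not matches:
--         return "", -1
--     best = max(matches, key=lambda m: len(m.group()))
--     return best.group(), best.start()
-- ===== Notes on version B (the rewrite author's own statement) =====
-- stated objective: idiomatic
-- what changed: Replaces the hand-rolled enumerate loop with explicit run/start state by re.finditer(r'\d+') enumerating maximal digit runs, then max(key=len) with first-wins ties.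
import Mathlib
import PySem

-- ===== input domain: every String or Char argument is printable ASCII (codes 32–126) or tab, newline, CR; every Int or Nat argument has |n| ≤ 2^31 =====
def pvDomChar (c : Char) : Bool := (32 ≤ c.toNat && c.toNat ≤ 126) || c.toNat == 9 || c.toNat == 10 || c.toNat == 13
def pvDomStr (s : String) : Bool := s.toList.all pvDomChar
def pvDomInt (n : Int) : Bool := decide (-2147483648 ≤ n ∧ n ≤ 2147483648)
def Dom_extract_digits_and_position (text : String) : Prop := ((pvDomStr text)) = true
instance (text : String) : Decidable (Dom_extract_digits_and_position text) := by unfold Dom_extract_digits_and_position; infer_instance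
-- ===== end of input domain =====

-- B replaces A's hand-rolled enumerate loop (building run/start state) by enumerating the
-- maximal digit runs directly (re.finditer(r'\d+')) and taking max by length (first wins on ties).


-- ===== PORT A =====
-- A's loop body: one step per (index, char) of enumerate(text), state = (digit_sequences, current_seq, start_pos)
def pvStepA (st : List (List Char × Int) × List Char × Int) (p : Int × Char) :
    List (List Char × Int) × List Char × Int :=
  if PySem.Chars.isdigit p.2 then
    (st.1, st.2.1 ++ [p.2], if st.2.1.isEmpty then p.1 else st.2.2)
  else
    if st.2.1.isEmpty then st else (st.1 ++ [(st.2.1, st.2.2)], [], st.2.2)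

-- the two post-loop lines: flush the pending run, then the empty test is max?'s none case
def pvFlushA (st : List (List Char × Int) × List Char × Int) : List (List Char × Int) :=
  if st.2.1.isEmpty then st.1 else st.1 ++ [(st.2.1, st.2.2)]

def extract_digits_and_position (text : String) : String × Int :=
  match PySem.List.max? (pvFlushA ((PySem.List.enumerate text.toList 0).foldl pvStepA ([], [], -1)))
      (fun x => x.1.length) with
  | none => ("", -1)
  | some l => (String.ofList l.1, l.2)

-- ===== PORT B =====
-- list(re.finditer(r'\d+', text)): the maximal digit runs with their start positions, left to right
def pvRuns (cs : List Char) (i : Int) : List (List Char × Int) :=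
  match cs with
  | [] => []
  | c :: rest =>
    if PySem.Chars.isdigit c then
      (List.takeWhile PySem.Chars.isdigit (c :: rest), i) ::
        pvRuns (List.dropWhile PySem.Chars.isdigit (c :: rest))
          (i + (List.takeWhile PySem.Chars.isdigit (c :: rest)).length)
    else pvRuns rest (i + 1)
termination_by cs.length
decreasing_by
  · simp only [List.dropWhile_cons, *, if_pos]
    exact Nat.lt_succ_of_le (List.length_dropWhile_le _ _)
  · simp

def extract_digits_and_position_alt (text : String) : String × Int :=
  match PySem.List.max? (pvRuns text.toList 0) (fun m => m.1.length) with
  | none => ("", -1)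
  | some m => (String.ofList m.1, m.2)

-- ===== PRECONDITION & SPEC =====
def Spec_extract_digits_and_position (text : String) (out : String × Int) : Prop := out = extract_digits_and_position_alt text
instance (text : String) (out : String × Int) : Decidable (Spec_extract_digits_and_position text out) := by unfold Spec_extract_digits_and_position; infer_instance

-- ===== CLAIM (what is proved, stated in full; the proofs are below) =====
def Claim_equal_extract_digits_and_position : Prop := ∀ (text : String), Dom_extract_digits_and_position text → Spec_extract_digits_and_position text (extract_digits_and_position text)

-- ===== LEMMAS AND PROOFS =====

-- invariant of A's loop: flushing the pending run after the fold yields exactly the maximal runs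
lemma pvLoopA_runs (cs : List Char) (s : Int) (seqs : List (List Char × Int))
    (cur : List Char) (start : Int) :
    pvFlushA ((PySem.List.enumerate cs s).foldl pvStepA (seqs, cur, start)) =
    seqs ++ (if cur.isEmpty then pvRuns cs s
             else (cur ++ cs.takeWhile PySem.Chars.isdigit, start) ::
                  pvRuns (cs.dropWhile PySem.Chars.isdigit)
                    (s + (cs.takeWhile PySem.Chars.isdigit).length)) := by
  induction cs generalizing s seqs cur start with
  | nil =>
    simp only [PySem.List.enumerate_nil, List.foldl_nil, pvFlushA]
    by_cases h : cur.isEmpty <;> simp [h, pvRuns]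
  | cons c rest ih =>
    rw [PySem.List.enumerate_cons, List.foldl_cons]
    by_cases hd : PySem.Chars.isdigit c
    · -- digit: current_seq grows, start set if it was empty
      have hne : ((cur ++ [c]).isEmpty) = false := by simp
      by_cases hc : cur.isEmpty
      · have hcur : cur = [] := List.isEmpty_iff.mp hc
        simp only [pvStepA, hd, if_pos, hc]
        rw [ih]
        simp [hcur, pvRuns, hd]
        congr 1
        ring
      · simp only [pvStepA, hd, if_pos, hc]
        rw [ih]
        simp [hne, hd]
        congr 1
        ring
    · -- non-digit: flush the pending run (if any)
      by_cases hc : cur.isEmpty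
      · have hcur : cur = [] := List.isEmpty_iff.mp hc
        simp only [pvStepA, hd, Bool.false_eq_true, if_false, hc, if_true]
        rw [ih]
        simp [hcur, pvRuns, hd]
      · simp only [pvStepA, hd, Bool.false_eq_true, if_false, hc]
        rw [ih]
        simp [hd, pvRuns]

lemma pv_seqs_eq_runs (text : String) :
    pvFlushA ((PySem.List.enumerate text.toList 0).foldl pvStepA ([], [], -1)) =
    pvRuns text.toList 0 := by
  rw [pvLoopA_runs]
  simp

-- ===== VERDICT (by name: the statement is the Claim_ definition above) =====
theorem extract_digits_and_position_spec : Claim_equal_extract_digits_and_position := by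
  intro text _
  unfold Spec_extract_digits_and_position extract_digits_and_position extract_digits_and_position_alt
  rw [pv_seqs_eq_runs]
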